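-- pv_equiv track=rewrite | github.com/younjunseon/baekjoon-programmers | 프로그래머스/0/181905. 문자열 뒤집기/문자열 뒤집기.py | solution
-- ===== SOURCE A (Python) =====
-- def solution(my_string, s, e):
--     answer = ''
--
--     for i in range(len(my_string)):
--         if(i>=s and i<=e):
--             answer += my_string[s+e-i]
--         else:
--             answer += my_string[i]
--     return answer
-- ===== SOURCE B (Python) =====
-- def solution(my_string, s, e):
--     if s > e:
--         return my_string
--     return my_string[:s] + my_string[s:e+1][::-1] + my_string[e+1:]
-- ===== Notes on version B (the rewrite author's own statement) =====
-- stated objective: idiomatic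
-- what changed: Replaces the character-by-character loop with index-mirror arithmetic by three slices (prefix + reversed middle slice + suffix), with an early return for s > e.
-- outside the precondition, e.g. on solution('abc', -1, 1): A returns 'acc', B returns 'abc'; on solution('ab', 0, 2): A raises IndexError, B returns 'ba'
import Mathlib
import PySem

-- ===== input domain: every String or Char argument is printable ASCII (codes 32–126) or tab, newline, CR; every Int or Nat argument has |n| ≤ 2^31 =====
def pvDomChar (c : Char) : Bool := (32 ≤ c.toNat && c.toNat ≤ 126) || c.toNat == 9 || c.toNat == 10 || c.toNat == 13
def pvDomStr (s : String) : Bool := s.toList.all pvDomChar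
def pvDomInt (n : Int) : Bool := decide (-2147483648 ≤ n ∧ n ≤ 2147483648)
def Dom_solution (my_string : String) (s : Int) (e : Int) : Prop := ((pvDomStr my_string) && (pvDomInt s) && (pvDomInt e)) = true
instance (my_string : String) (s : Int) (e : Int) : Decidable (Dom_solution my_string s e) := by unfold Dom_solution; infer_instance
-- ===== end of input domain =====

-- B replaces A's per-character loop with mirrored indexing by three slices: prefix + reversed middle + suffix.

-- ===== PORT A =====
-- one loop step: the appended chunk for index i ([] marks the unreachable-in-Pre IndexError)
def solutionStep (cs : List Char) (s e i : Int) : List Char :=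
  if i ≥ s ∧ i ≤ e then
    match PySem.List.pyGet? cs (s + e - i) with
    | some c => [c]
    | none => []
  else
    match PySem.List.pyGet? cs i with
    | some c => [c]
    | none => []

def solution (my_string : String) (s : Int) (e : Int) : String :=
  let cs := my_string.toList
  let answer := (PySem.List.pyRange 0 (cs.length : Int) 1).foldl
    (fun acc i => acc ++ solutionStep cs s e i) []
  String.ofList answer

-- ===== PORT B =====
def solution_alt (my_string : String) (s : Int) (e : Int) : String :=
  if s > e then my_string
  else
    let cs := my_string.toList
    String.ofList (PySem.List.slice cs none (some s)
      ++ (PySem.List.slice cs (some s) (some (e + 1))).reverse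
      ++ PySem.List.slice cs (some (e + 1)) none)

-- ===== PRECONDITION & SPEC =====
-- Pre_ restricts s, e to the task's natural domain (0 ≤ s ≤ e < len, plus s > e / s ≥ len /
-- the empty string, where no character is mirrored); outside it A raises IndexError or silently
-- wraps around via Python negative indexing (e.g. ('abc', -1, 1): A returns 'acc', B 'abc').
def Pre_solution (my_string : String) (s : Int) (e : Int) : Prop :=
  my_string.toList = [] ∨ e < s ∨ ((my_string.toList.length : Int) ≤ s) ∨
    (0 ≤ s ∧ s ≤ e ∧ e < (my_string.toList.length : Int))
instance (my_string : String) (s : Int) (e : Int) : Decidable (Pre_solution my_string s e) := by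
  unfold Pre_solution; infer_instance

def pvWitness_solution : String × Int × Int := ("abcde", 1, 3)

def Spec_solution (my_string : String) (s : Int) (e : Int) (out : String) : Prop := out = solution_alt my_string s e
instance (my_string : String) (s : Int) (e : Int) (out : String) : Decidable (Spec_solution my_string s e out) := by unfold Spec_solution; infer_instance

-- ===== CLAIM (what is proved, stated in full; the proofs are below) =====
def Claim_equal_solution : Prop := ∀ (my_string : String) (s : Int) (e : Int), Dom_solution my_string s e → Pre_solution my_string s e → Spec_solution my_string s e (solution my_string s e)

-- ===== LEMMAS AND PROOFS =====
lemma flatMap_eq_map {α β : Type} (l : List α) (g : α → List β) (f : α → β)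
    (h : ∀ x ∈ l, g x = [f x]) : l.flatMap g = l.map f := by
  induction l with
  | nil => rfl
  | cons a t ih =>
    simp only [List.flatMap_cons, List.map_cons, h a (List.mem_cons_self),
      ih (fun x hx => h x (List.mem_cons_of_mem _ hx))]
    rfl

lemma step_out (cs : List Char) (s e i : Int) (h0 : 0 ≤ i) (hn : i < (cs.length : Int))
    (hout : ¬ (i ≥ s ∧ i ≤ e)) :
    solutionStep cs s e i = [cs.getD i.toNat 'x'] := by
  unfold solutionStep
  rw [if_neg hout, PySem.List.pyGet?_eq_some_getElem cs h0 hn,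
    List.getD_eq_getElem _ _ (by omega)]

lemma step_in (cs : List Char) (s e i : Int) (h0 : 0 ≤ s + e - i) (hn : s + e - i < (cs.length : Int))
    (hin : i ≥ s ∧ i ≤ e) :
    solutionStep cs s e i = [cs.getD (s + e - i).toNat 'x'] := by
  unfold solutionStep
  rw [if_pos hin, PySem.List.pyGet?_eq_some_getElem cs h0 hn,
    List.getD_eq_getElem _ _ (by omega)]

-- the loop body over a subrange whose indices all take the else-branch is the identity slice
lemma flat_out (cs : List Char) (s e a b : Int) (h0 : 0 ≤ a)
    (hb : b ≤ (cs.length : Int))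
    (hout : ∀ i, a ≤ i → i < b → ¬ (i ≥ s ∧ i ≤ e)) :
    (PySem.List.pyRange a b 1).flatMap (solutionStep cs s e)
      = (cs.drop a.toNat).take (b.toNat - a.toNat) := by
  rw [flatMap_eq_map _ _ (fun i => cs.getD i.toNat 'x') ?_]
  · rw [PySem.List.pyRange_one]
    apply List.ext_getElem
    · simp; omega
    · intro k h1 h2
      simp only [List.getElem_map, List.getElem_range, List.getElem_take, List.getElem_drop]
      have hk : k < (b - a).toNat := by simpa using h1
      rw [List.getD_eq_getElem _ _ (by omega)]
      congr 1
      omega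
  · intro i hi
    rw [PySem.List.mem_pyRange_one] at hi
    exact step_out cs s e i (by omega) (by omega) (hout i hi.1 hi.2)

lemma flat_in (cs : List Char) (s e : Int) (h0 : 0 ≤ s) (hse : s ≤ e)
    (hn : e < (cs.length : Int)) :
    (PySem.List.pyRange s (e + 1) 1).flatMap (solutionStep cs s e)
      = ((cs.drop s.toNat).take ((e + 1).toNat - s.toNat)).reverse := by
  rw [flatMap_eq_map _ _ (fun i => cs.getD (s + e - i).toNat 'x') ?_]
  · rw [PySem.List.pyRange_one]
    apply List.ext_getElem
    · simp only [List.length_map, List.length_range, List.length_reverse,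
        List.length_take, List.length_drop]
      omega
    · intro k h1 h2
      simp only [List.getElem_map, List.getElem_range, List.getElem_reverse,
        List.getElem_take, List.getElem_drop, List.length_take,
        List.length_drop]
      have hk : k < (e + 1 - s).toNat := by simpa using h1
      simp only [List.length_reverse, List.length_take, List.length_drop] at h2
      rw [List.getD_eq_getElem _ _ (by omega)]
      congr 1
      omega
  · intro i hi
    rw [PySem.List.mem_pyRange_one] at hi
    exact step_in cs s e i (by omega) (by omega) ⟨by omega, by omega⟩

-- ===== VERDICT (by name: the statement is the Claim_ definition above) =====
theorem solution_spec : Claim_equal_solution := by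
  intro my_string s e _ hpre
  unfold Spec_solution solution solution_alt
  simp only []
  have hfold : ∀ l : List Int, l.foldl (fun acc i => acc ++ solutionStep my_string.toList s e i) [] =
      l.flatMap (solutionStep my_string.toList s e) := by
    intro l
    rw [PySem.List.foldl_append_eq_flatMap]
    simp
  rw [hfold]
  rcases hpre with hemp | hlt | hsn | ⟨h0, hse, hn⟩
  · have hflat : List.flatMap (solutionStep my_string.toList s e)
        (PySem.List.pyRange 0 (my_string.toList.length : Int) 1) = [] := by
      rw [hemp]; rfl
    rw [hflat]
    have hM : my_string = "" := by
      rw [← String.ofList_toList (s := my_string), hemp]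
    rw [hM]
    by_cases hgt : s > e
    · rw [if_pos hgt]
    · rw [if_neg hgt]
      have h1 : ∀ (a? b? : Option Int), PySem.List.slice (("" : String).toList) a? b? = [] := by
        intro a? b?
        cases a? <;> cases b? <;> simp [PySem.List.slice]
      rw [h1, h1, h1]
      rfl
  · rw [if_pos (by omega)]
    have h := flat_out my_string.toList s e 0 (my_string.toList.length : Int) (by omega) (by omega)
      (fun i h1 h2 h3 => by omega)
    simp only [Int.toNat_zero, List.drop_zero, Int.toNat_natCast, Nat.sub_zero] at h
    rw [h, List.take_length, String.ofList_toList]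
  · have h := flat_out my_string.toList s e 0 (my_string.toList.length : Int) (by omega) (by omega)
      (fun i h1 h2 h3 => by omega)
    simp only [Int.toNat_zero, List.drop_zero, Int.toNat_natCast, Nat.sub_zero] at h
    rw [h, List.take_length]
    by_cases hgt : s > e
    · rw [if_pos hgt, String.ofList_toList]
    · rw [if_neg hgt]
      have hs0 : (0 : Int) ≤ s := by omega
      rw [PySem.List.slice_to my_string.toList hs0, PySem.List.slice_toNat _ hs0 (by omega),
          PySem.List.slice_from my_string.toList (by omega)]
      have hd1 : List.drop s.toNat my_string.toList = [] :=
        List.drop_eq_nil_of_le (by omega)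
      have hd2 : List.drop (e + 1).toNat my_string.toList = [] :=
        List.drop_eq_nil_of_le (by omega)
      have ht : List.take s.toNat my_string.toList = my_string.toList :=
        List.take_of_length_le (by omega)
      rw [hd1, hd2, ht, List.take_nil, List.reverse_nil, List.append_nil, List.append_nil,
        String.ofList_toList]
  · rw [if_neg (by omega)]
    rw [PySem.List.pyRange_one_append 0 s (my_string.toList.length : Int) h0 (by omega),
        PySem.List.pyRange_one_append s (e + 1) (my_string.toList.length : Int) (by omega) (by omega),
        List.flatMap_append, List.flatMap_append]
    rw [flat_out my_string.toList s e 0 s (by omega) (by omega) (fun i h1 h2 h3 => by omega),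
        flat_in my_string.toList s e h0 hse hn,
        flat_out my_string.toList s e (e + 1) (my_string.toList.length : Int) (by omega) (by omega)
          (fun i h1 h2 h3 => by omega)]
    rw [PySem.List.slice_to my_string.toList h0, PySem.List.slice_toNat _ h0 (by omega),
        PySem.List.slice_from my_string.toList (by omega)]
    simp only [Int.toNat_zero, List.drop_zero, Nat.sub_zero, ← List.append_assoc]
    have h3 : List.take ((my_string.toList.length : Int).toNat - (e + 1).toNat)
        (List.drop (e + 1).toNat my_string.toList) = List.drop (e + 1).toNat my_string.toList := by
      apply List.take_of_length_le
      simp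
    rw [h3]
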